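-- pv_equiv track=rewrite | github.com/Hq030302/Enkripsi-Dekripsi-Audio-to-Image | matriks.py | matriks_cipherteks
-- ===== SOURCE A (Python) =====
-- def matriks_cipherteks(pcm_list):
--     blok_panjang = 16  # Panjang blok, sesuaikan dengan kebutuhan (misalnya, 16 untuk AES)
--
--     # Membagi list PCM menjadi blok-blok dengan panjang blok yang diinginkan
--     blok_pcm = [pcm_list[i:i+blok_panjang] for i in range(0, len(pcm_list), blok_panjang)]
--
--     # Mengonversi setiap blok PCM menjadi matriks 4x4
--     matriks_3d = []
--     for blok in blok_pcm:
--         matriks_4x4 = [blok[i:i+4] for i in range(0, len(blok), 4)]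
--         matriks_3d.append(matriks_4x4)
--
--     return matriks_3d
-- ===== SOURCE B (Python) =====
-- def matriks_cipherteks(pcm_list):
--     # One element-wise pass with accumulators (row -> block -> blocks)
--     # instead of A's two levels of range/slice comprehensions.
--     blocks = []
--     block = []
--     row = []
--     for x in pcm_list:
--         row.append(x)
--         if len(row) == 4:
--             block.append(row)
--             row = []
--             if len(block) == 4:
--                 blocks.append(block)
--                 block = []
--     if row:
--         block.append(row)
--     if block:
--         blocks.append(block)
--     return blocks
-- ===== Notes on version B (the rewrite author's own statement) =====
-- stated objective: alternative
-- what changed: A builds 16-element blocks with a range/slice comprehension and then re-slices each block into 4-element rows; B makes a single element-wise pass over the list, accumulating the current row and current block and flushing them into the result as they fill (partial row/block flushed at the end).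
import Mathlib
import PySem

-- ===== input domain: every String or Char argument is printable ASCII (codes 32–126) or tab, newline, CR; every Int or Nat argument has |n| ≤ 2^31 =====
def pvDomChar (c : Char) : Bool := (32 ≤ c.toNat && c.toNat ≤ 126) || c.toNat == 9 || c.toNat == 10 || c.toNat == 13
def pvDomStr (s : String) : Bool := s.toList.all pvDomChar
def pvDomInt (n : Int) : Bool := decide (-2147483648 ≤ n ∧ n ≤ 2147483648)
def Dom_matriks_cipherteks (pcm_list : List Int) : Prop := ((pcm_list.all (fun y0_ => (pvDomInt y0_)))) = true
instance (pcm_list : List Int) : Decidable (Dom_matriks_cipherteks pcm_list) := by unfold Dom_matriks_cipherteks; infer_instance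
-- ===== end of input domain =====

-- B replaces A's two levels of range/slice comprehensions by a single element-wise
-- pass with row/block accumulators (alternative decomposition, same O(n) cost).

-- ===== PORT A =====
def matriks_cipherteks (pcm_list : List Int) : List (List (List Int)) :=
  let blok_panjang : Int := 16
  let blok_pcm : List (List Int) :=
    (PySem.List.pyRange 0 (PySem.List.len pcm_list) blok_panjang).map
      (fun i => PySem.List.slice pcm_list (some i) (some (i + blok_panjang)))
  blok_pcm.foldl
    (fun matriks_3d blok =>
      matriks_3d ++ [(PySem.List.pyRange 0 (PySem.List.len blok) 4).map
        (fun i => PySem.List.slice blok (some i) (some (i + 4)))]) []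

-- ===== PORT B =====
-- state = (blocks, block, row); one step of Source B's for-loop body
def pvStep (s : List (List (List Int)) × List (List Int) × List Int) (x : Int) :
    List (List (List Int)) × List (List Int) × List Int :=
  let row := s.2.2 ++ [x]
  if row.length = 4 then
    let block := s.2.1 ++ [row]
    if block.length = 4 then (s.1 ++ [block], [], [])
    else (s.1, block, [])
  else (s.1, s.2.1, row)

-- Source B's two trailing 'if row:' / 'if block:' flushes
def pvFinal (s : List (List (List Int)) × List (List Int) × List Int) :
    List (List (List Int)) :=
  let block := if s.2.2 ≠ [] then s.2.1 ++ [s.2.2] else s.2.1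
  if block ≠ [] then s.1 ++ [block] else s.1

def matriks_cipherteks_alt (pcm_list : List Int) : List (List (List Int)) :=
  pvFinal (pcm_list.foldl pvStep ([], [], []))

-- ===== PRECONDITION & SPEC =====
def Spec_matriks_cipherteks (pcm_list : List Int) (out : List (List (List Int))) : Prop := out = matriks_cipherteks_alt pcm_list
instance (pcm_list : List Int) (out : List (List (List Int))) : Decidable (Spec_matriks_cipherteks pcm_list out) := by unfold Spec_matriks_cipherteks; infer_instance

-- ===== CLAIM (what is proved, stated in full; the proofs are below) =====
def Claim_equal_matriks_cipherteks : Prop := ∀ (pcm_list : List Int), Dom_matriks_cipherteks pcm_list → Spec_matriks_cipherteks pcm_list (matriks_cipherteks pcm_list)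

-- ===== LEMMAS AND PROOFS =====

-- proof-side chunking functions (used by neither port)
def pvChunk4 {α : Type} : List α → List (List α)
  | [] => []
  | x :: xs => ((x :: xs).take 4) :: pvChunk4 ((x :: xs).drop 4)
termination_by l => l.length
decreasing_by simp

def pvChunk16 {α : Type} : List α → List (List α)
  | [] => []
  | x :: xs => ((x :: xs).take 16) :: pvChunk16 ((x :: xs).drop 16)
termination_by l => l.length
decreasing_by simp

theorem pvChunk4_nil {α : Type} : pvChunk4 ([] : List α) = [] := by rw [pvChunk4]

theorem pvChunk4_cons {α : Type} (x : α) (xs : List α) :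
    pvChunk4 (x :: xs) = ((x :: xs).take 4) :: pvChunk4 ((x :: xs).drop 4) := by rw [pvChunk4]

theorem pvChunk16_nil {α : Type} : pvChunk16 ([] : List α) = [] := by rw [pvChunk16]

theorem pvChunk16_cons {α : Type} (x : α) (xs : List α) :
    pvChunk16 (x :: xs) = ((x :: xs).take 16) :: pvChunk16 ((x :: xs).drop 16) := by rw [pvChunk16]

theorem pvChunk4_small {α : Type} (l : List α) (h : l ≠ []) (h4 : l.length ≤ 4) :
    pvChunk4 l = [l] := by
  cases l with
  | nil => exact absurd rfl h
  | cons x xs =>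
    rw [pvChunk4_cons, List.take_of_length_le h4, List.drop_eq_nil_of_le h4, pvChunk4_nil]

theorem pvChunk4_ne {α : Type} (l : List α) (h : l ≠ []) :
    pvChunk4 l = l.take 4 :: pvChunk4 (l.drop 4) := by
  cases l with
  | nil => exact absurd rfl h
  | cons x xs => rw [pvChunk4_cons]

theorem pvChunk4_step {α : Type} (l t : List α) (h : l.length = 4) :
    pvChunk4 (l ++ t) = l :: pvChunk4 t := by
  match l, h with
  | [a, b, c, d], _ => rw [List.cons_append, pvChunk4]; simp

theorem pvChunk4_take (k : Nat) : ∀ (xs : List Int),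
    (pvChunk4 xs).take k = pvChunk4 (xs.take (4 * k)) := by
  induction k with
  | zero => intro xs; simp [pvChunk4_nil]
  | succ k ih =>
    intro xs
    cases xs with
    | nil => simp [pvChunk4_nil]
    | cons x xs =>
      rw [pvChunk4_cons, List.take_succ_cons, ih,
          pvChunk4_ne ((x :: xs).take (4 * (k + 1))) (by simp [List.take_eq_nil_iff])]
      congr 1
      · rw [List.take_take, Nat.min_eq_left (by omega)]
      · congr 1
        rw [List.drop_take, show 4 * (k + 1) - 4 = 4 * k by omega]

theorem pvChunk4_drop (k : Nat) : ∀ (xs : List Int),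
    (pvChunk4 xs).drop k = pvChunk4 (xs.drop (4 * k)) := by
  induction k with
  | zero => intro xs; simp
  | succ k ih =>
    intro xs
    cases xs with
    | nil => simp [pvChunk4_nil]
    | cons x xs =>
      rw [pvChunk4_cons, List.drop_succ_cons, ih, List.drop_drop,
          show 4 * (k + 1) = 4 + 4 * k by ring]

theorem pvMap16 : ∀ (xs : List Int),
    (pvChunk16 xs).map pvChunk4 = pvChunk4 (pvChunk4 xs) := by
  intro xs
  induction xs using pvChunk16.induct with
  | case1 => simp [pvChunk16_nil, pvChunk4_nil]
  | case2 x xs ih =>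
    rw [pvChunk16_cons, List.map_cons, ih]
    conv_rhs => rw [pvChunk4_ne (pvChunk4 (x :: xs)) (by rw [pvChunk4_cons]; simp)]
    rw [pvChunk4_take, pvChunk4_drop]

-- A-side: range-of-slices over a step-c range IS chunking (nat form, then PySem form)
theorem pvRangeChunk4 : ∀ (xs : List Int),
    (List.range ((xs.length + 3) / 4)).map (fun k => (xs.drop (4 * k)).take 4) = pvChunk4 xs := by
  intro xs
  induction xs using pvChunk4.induct with
  | case1 => simp [pvChunk4_nil]
  | case2 x xs ih =>
    have hm : ((x :: xs).length + 3) / 4 = (((x :: xs).drop 4).length + 3) / 4 + 1 := by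
      simp only [List.length_drop, List.length_cons]; omega
    rw [hm, List.range_succ_eq_map, List.map_cons, List.map_map, pvChunk4_cons,
        List.cons_eq_cons]
    refine ⟨by simp, ?_⟩
    rw [← ih]
    apply List.map_congr_left
    intro k _
    simp only [Function.comp_apply, Nat.succ_eq_add_one, List.drop_drop]
    congr 2
    omega

theorem pvRangeChunk16 : ∀ (xs : List Int),
    (List.range ((xs.length + 15) / 16)).map (fun k => (xs.drop (16 * k)).take 16) = pvChunk16 xs := by
  intro xs
  induction xs using pvChunk16.induct with
  | case1 => simp [pvChunk16_nil]
  | case2 x xs ih =>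
    have hm : ((x :: xs).length + 15) / 16 = (((x :: xs).drop 16).length + 15) / 16 + 1 := by
      simp only [List.length_drop, List.length_cons]; omega
    rw [hm, List.range_succ_eq_map, List.map_cons, List.map_map, pvChunk16_cons,
        List.cons_eq_cons]
    refine ⟨by simp, ?_⟩
    rw [← ih]
    apply List.map_congr_left
    intro k _
    simp only [Function.comp_apply, Nat.succ_eq_add_one, List.drop_drop]
    congr 2
    omega

theorem pvSliceChunk (c : Nat) (hc : 0 < c)
    (chunk : List Int → List (List Int))
    (hchunk : ∀ xs : List Int,
      (List.range ((xs.length + (c - 1)) / c)).map (fun k => (xs.drop (c * k)).take c) = chunk xs)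
    (hnil : chunk [] = []) :
    ∀ (xs : List Int),
      (PySem.List.pyRange 0 (PySem.List.len xs) (c : Int)).map
        (fun i => PySem.List.slice xs (some i) (some (i + (c : Int)))) = chunk xs := by
  intro xs
  rw [PySem.List.len_eq, PySem.List.pyRange_of_pos 0 _ (by exact_mod_cast hc)]
  cases xs with
  | nil => simp [hnil]
  | cons x t =>
    have hpos : (0 : Int) < ((x :: t).length : Int) := by push_cast [List.length_cons]; omega
    rw [if_pos hpos]
    have hcnt : (((((x :: t).length : Int)) - 0 + (c : Int) - 1) / (c : Int)).toNat
        = ((x :: t).length + (c - 1)) / c := by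
      have : ((((x :: t).length : Int)) - 0 + (c : Int) - 1) = (((x :: t).length + (c - 1) : Nat) : Int) := by
        push_cast; omega
      rw [this, ← Int.natCast_ediv, Int.toNat_natCast]
    rw [hcnt, List.map_map, ← hchunk (x :: t)]
    apply List.map_congr_left
    intro k _
    show PySem.List.slice (x :: t) (some (0 + (c : Int) * (k : Int)))
        (some (0 + (c : Int) * (k : Int) + (c : Int))) = ((x :: t).drop (c * k)).take c
    have h0 : (0 : Int) + (c : Int) * (k : Int) = ((c * k : Nat) : Int) := by push_cast; ring
    rw [h0, PySem.List.slice_natCast_add (x :: t) (c * k) c]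

theorem pvA_eq : ∀ (pcm_list : List Int),
    matriks_cipherteks pcm_list = (pvChunk16 pcm_list).map pvChunk4 := by
  intro pcm_list
  show (((PySem.List.pyRange 0 (PySem.List.len pcm_list) 16).map
      (fun i => PySem.List.slice pcm_list (some i) (some (i + 16)))).foldl
      (fun matriks_3d blok =>
        matriks_3d ++ [(PySem.List.pyRange 0 (PySem.List.len blok) 4).map
          (fun i => PySem.List.slice blok (some i) (some (i + 4)))]) []) = _
  rw [PySem.List.foldl_append_singleton_eq_map]
  rw [show ((16 : Int)) = ((16 : Nat) : Int) by norm_num]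
  rw [pvSliceChunk 16 (by norm_num) pvChunk16 (by intro xs; exact pvRangeChunk16 xs) (pvChunk16_nil)]
  simp only [List.nil_append]
  apply List.map_congr_left
  intro blok _
  rw [show ((4 : Int)) = ((4 : Nat) : Int) by norm_num]
  exact pvSliceChunk 4 (by norm_num) pvChunk4 (by intro xs; exact pvRangeChunk4 xs) (pvChunk4_nil) blok

-- B-side: loop invariant for the accumulator pass
theorem pvB_inv : ∀ (ys : List Int) (B : List (List (List Int))) (b : List (List Int)) (r : List Int),
    r.length < 4 → b.length < 4 →
    pvFinal (ys.foldl pvStep (B, b, r)) = B ++ pvChunk4 (b ++ pvChunk4 (r ++ ys)) := by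
  intro ys
  induction ys with
  | nil =>
    intro B b r hr hb
    simp only [List.foldl_nil, List.append_nil]
    by_cases hrn : r = []
    · subst hrn
      by_cases hbn : b = []
      · subst hbn; simp [pvFinal, pvChunk4_nil]
      · simp [pvFinal, hbn, pvChunk4_nil, pvChunk4_small b hbn (by omega)]
    · rw [pvChunk4_small r hrn (by omega)]
      rw [pvChunk4_small (b ++ [r]) (by simp) (by simp; omega)]
      simp [pvFinal, hrn]
  | cons x ys ih =>
    intro B b r hr hb
    rw [List.foldl_cons]
    by_cases h4 : r.length = 3
    · by_cases h44 : b.length = 3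
      · have hstep : pvStep (B, b, r) x = (B ++ [b ++ [r ++ [x]]], [], []) := by
          simp only [pvStep]
          split_ifs with c1 c2 <;> simp_all
        rw [hstep, ih _ _ _ (by norm_num) (by norm_num)]
        rw [show r ++ x :: ys = (r ++ [x]) ++ ys by simp]
        rw [pvChunk4_step (r ++ [x]) ys (show (r ++ [x]).length = 4 by simp [h4])]
        rw [show b ++ (r ++ [x]) :: pvChunk4 ys = (b ++ [r ++ [x]]) ++ pvChunk4 ys by simp]
        rw [pvChunk4_step (b ++ [r ++ [x]]) (pvChunk4 ys)
            (show (b ++ [r ++ [x]]).length = 4 by simp [h44])]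
        simp
      · have hstep : pvStep (B, b, r) x = (B, b ++ [r ++ [x]], []) := by
          simp only [pvStep]
          split_ifs with c1 c2 <;> simp_all
        rw [hstep, ih _ _ _ (by norm_num) (by simp; omega)]
        rw [show r ++ x :: ys = (r ++ [x]) ++ ys by simp]
        rw [pvChunk4_step (r ++ [x]) ys (show (r ++ [x]).length = 4 by simp [h4])]
        simp
    · have hstep : pvStep (B, b, r) x = (B, b, r ++ [x]) := by
        simp only [pvStep]
        split_ifs with c1 <;> simp_all
      rw [hstep, ih _ _ _ (by simp; omega) hb]
      simp

-- ===== VERDICT (by name: the statement is the Claim_ definition above) =====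
theorem matriks_cipherteks_spec : Claim_equal_matriks_cipherteks := by
  intro pcm_list _
  show matriks_cipherteks pcm_list = matriks_cipherteks_alt pcm_list
  rw [pvA_eq, pvMap16]
  show _ = pvFinal (pcm_list.foldl pvStep ([], [], []))
  rw [pvB_inv pcm_list [] [] [] (by norm_num) (by norm_num)]
  simp
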